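-- pv_equiv track=rewrite | github.com/TaoChenOSU/CS434_Final_Project | helper.py | wordConnection
-- ===== SOURCE A (Python) =====
-- def createWordPairs(sentence_1, sentence_2):
--     pairs = []
--     pairsWithPositions = []
--     word_1_pos = 0
--     for word_1 in sentence_1:
--         word_2_pos = 0
--         for word_2 in sentence_2:
--             if word_1 != word_2:
--                 # To make sure the no such pair or the reverse of the pair has been created
--                 # if pairs.count([word_1, word_2]) == 0 and pairs.count([word_2, word_1]) == 0:
--                 # if pairs.count([word_1, word_2]) == 0:
--                 pairs.append([word_1, word_2])
--                 pairsWithPositions.append([word_1, word_2, [[word_1_pos, word_2_pos]]])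
--                 # elif pairs.count([word_1, word_2]) == 0 and pairs.count([word_2, word_1]) != 0:
--                 #     index = pairs.index([word_2, word_1])
--                 #     pairsWithPositions[index][2].append([word_1_pos, word_2_pos])
--                 # else:
--                 #     index = pairs.index([word_1, word_2])
--                 #     pairsWithPositions[index][2].append([word_1_pos, word_2_pos])
--             word_2_pos += 1
--         word_1_pos += 1
--
--     return pairsWithPositions
--
-- def wordConnection(sentence_1, sentence_2):
--     # default k to be 1, meaning the function is going
--     # to analyze the two neighboring words on each side
--     # For now, k is fixed at 1 to avoid more complex programming
--     # and k = 1 makes finding connectivity more easily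
--     # if you change k to any number other than 1, the program
--     # will crash
--     k = 1
--     # the original pair plus the neighboring words
--     connections = []
--     wordPairs = createWordPairs(sentence_1, sentence_2)
--     # find neighboring words
--     # if there's less than 2 neighboring words, work with however
--     # many there is.
--     sentence_1_len = len(sentence_1)
--     sentence_2_len = len(sentence_2)
--
--     for pair in wordPairs:
--         # [[words in sentence_1], [words in sentence_2]]
--         left = []
--         right = []
--         for position in pair[2]:
--             # left side, both words have at least k words on their left sides
--             if position[0]-k >= 0 and position[1]-k >= 0:
--                 for i in range(k):
--                     left.append([sentence_1[position[0]-1-i], sentence_2[position[1]-1-i]])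
--             # left side, one or both of the sides has less than k words
--             elif position[0]-k < 0 or position[1]-k < 0:
--                 if position[0] <= position[1]:
--                     for i in range(position[0]):
--                         left.append([sentence_1[position[0]-1-i], sentence_2[position[1]-1-i]])
--                 else:
--                     for i in range(position[1]):
--                         left.append([sentence_1[position[0]-1-i], sentence_2[position[1]-1-i]])
--
--             # right side, both words have at least k words on their right sides
--             if position[0]+k < sentence_1_len and position[1]+k < sentence_2_len:
--                 for i in range(k):
--                     right.append([sentence_1[position[0]+1+i], sentence_2[position[1]+1+i]])
--             # right side, one of the sides has less than k words
--             elif position[0]+k >= sentence_1_len or position[1]+k >= sentence_2_len: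
--                 if sentence_1_len-position[0] >= sentence_2_len-position[1]:
--                     for i in range(sentence_2_len-position[1]-1):
--                         right.append([sentence_1[position[0]+1+i], sentence_2[position[1]+1+i]])
--                 else:
--                     for i in range(sentence_1_len-position[0]-1):
--                         right.append([sentence_1[position[0]+1+i], sentence_2[position[1]+1+i]])
--
--         connections.append([pair[0], pair[1], list(left), list(right)])
--
--     # for item in connections:
--     #     print item
--     return connections
-- ===== SOURCE B (Python) =====
-- def wordConnection(sentence_1, sentence_2):
--     # One direct pass over all index pairs; k=1 collapses A's branch logic to
--     # a single optional left neighbor pair and a single optional right neighbor pair.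
--     n1 = len(sentence_1)
--     n2 = len(sentence_2)
--     out = []
--     for p0, w1 in enumerate(sentence_1):
--         for p1, w2 in enumerate(sentence_2):
--             if w1 == w2:
--                 continue
--             left = [[sentence_1[p0 - 1], sentence_2[p1 - 1]]] if p0 >= 1 and p1 >= 1 else []
--             right = [[sentence_1[p0 + 1], sentence_2[p1 + 1]]] if p0 + 1 < n1 and p1 + 1 < n2 else []
--             out.append([w1, w2, left, right])
--     return out
-- ===== Notes on version B (the rewrite author's own statement) =====
-- stated objective: simpler
-- what changed: Replaced A's two-pass build (createWordPairs producing position-annotated pairs, then a reprocessing loop with multi-branch range(k) case analysis over each position list) by a single direct double loop over enumerate that appends at most one left-neighbor and one right-neighbor pair per word pair; with k=1 all of A's boundary branches collapse to empty or a singleton.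
import Mathlib
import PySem

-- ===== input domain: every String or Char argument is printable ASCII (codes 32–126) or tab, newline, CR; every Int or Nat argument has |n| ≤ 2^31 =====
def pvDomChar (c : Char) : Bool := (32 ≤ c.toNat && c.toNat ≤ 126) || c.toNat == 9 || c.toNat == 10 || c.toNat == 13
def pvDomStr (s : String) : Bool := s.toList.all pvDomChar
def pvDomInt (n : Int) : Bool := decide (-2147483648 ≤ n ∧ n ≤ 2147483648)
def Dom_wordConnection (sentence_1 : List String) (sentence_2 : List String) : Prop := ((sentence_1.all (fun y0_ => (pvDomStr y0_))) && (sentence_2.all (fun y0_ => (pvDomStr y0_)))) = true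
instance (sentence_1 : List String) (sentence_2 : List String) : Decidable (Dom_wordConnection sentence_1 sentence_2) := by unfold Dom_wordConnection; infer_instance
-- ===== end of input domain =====

-- B replaces A's build-then-reprocess two-pass structure (createWordPairs + position-list
-- reprocessing with multi-branch range loops) by one direct double loop appending at most one
-- left-neighbor and one right-neighbor pair; objective: simpler.  (Python list indexing is
-- ported with PySem.List.pyGetD with default "": every index A or B actually uses is in range,
-- so the ports are exact.)

-- ===== PORT A =====
-- inner loop of createWordPairs: state (pairs, pairsWithPositions), word_2_pos counter
def cwpInner (word_1 : String) (rem : List String) (p0 : Int) (p1 : Int)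
    (pairs : List (List String)) (pwp : List (String × String × List (Int × Int))) :
    List (List String) × List (String × String × List (Int × Int)) :=
  match rem with
  | [] => (pairs, pwp)
  | word_2 :: rest =>
      if word_1 ≠ word_2 then
        cwpInner word_1 rest p0 (p1 + 1) (pairs ++ [[word_1, word_2]])
          (pwp ++ [(word_1, word_2, [(p0, p1)])])
      else
        cwpInner word_1 rest p0 (p1 + 1) pairs pwp

-- outer loop of createWordPairs: word_1_pos counter
def cwpOuter (rem : List String) (sentence_2 : List String) (p0 : Int)
    (pairs : List (List String)) (pwp : List (String × String × List (Int × Int))) :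
    List (List String) × List (String × String × List (Int × Int)) :=
  match rem with
  | [] => (pairs, pwp)
  | word_1 :: rest =>
      let st := cwpInner word_1 sentence_2 p0 0 pairs pwp
      cwpOuter rest sentence_2 (p0 + 1) st.1 st.2

def createWordPairsLean (sentence_1 : List String) (sentence_2 : List String) :
    List (String × String × List (Int × Int)) :=
  (cwpOuter sentence_1 sentence_2 0 [] []).2

-- the 'for position in pair[2]' loop of wordConnection, state (left, right); k = 1
def wcPos (s1 s2 : List String) (n1 n2 : Int) (positions : List (Int × Int))
    (left right : List (List String)) : List (List String) × List (List String) :=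
  match positions with
  | [] => (left, right)
  | (p0, p1) :: rest =>
      let left' :=
        if p0 - 1 ≥ 0 ∧ p1 - 1 ≥ 0 then
          (PySem.List.pyRange 0 1 1).foldl
            (fun acc i => acc ++ [[PySem.List.pyGetD s1 (p0 - 1 - i) "", PySem.List.pyGetD s2 (p1 - 1 - i) ""]]) left
        else if p0 - 1 < 0 ∨ p1 - 1 < 0 then
          if p0 ≤ p1 then
            (PySem.List.pyRange 0 p0 1).foldl
              (fun acc i => acc ++ [[PySem.List.pyGetD s1 (p0 - 1 - i) "", PySem.List.pyGetD s2 (p1 - 1 - i) ""]]) left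
          else
            (PySem.List.pyRange 0 p1 1).foldl
              (fun acc i => acc ++ [[PySem.List.pyGetD s1 (p0 - 1 - i) "", PySem.List.pyGetD s2 (p1 - 1 - i) ""]]) left
        else left
      let right' :=
        if p0 + 1 < n1 ∧ p1 + 1 < n2 then
          (PySem.List.pyRange 0 1 1).foldl
            (fun acc i => acc ++ [[PySem.List.pyGetD s1 (p0 + 1 + i) "", PySem.List.pyGetD s2 (p1 + 1 + i) ""]]) right
        else if p0 + 1 ≥ n1 ∨ p1 + 1 ≥ n2 then
          if n1 - p0 ≥ n2 - p1 then
            (PySem.List.pyRange 0 (n2 - p1 - 1) 1).foldl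
              (fun acc i => acc ++ [[PySem.List.pyGetD s1 (p0 + 1 + i) "", PySem.List.pyGetD s2 (p1 + 1 + i) ""]]) right
          else
            (PySem.List.pyRange 0 (n1 - p0 - 1) 1).foldl
              (fun acc i => acc ++ [[PySem.List.pyGetD s1 (p0 + 1 + i) "", PySem.List.pyGetD s2 (p1 + 1 + i) ""]]) right
        else right
      wcPos s1 s2 n1 n2 rest left' right'

def wordConnection (sentence_1 : List String) (sentence_2 : List String) :
    List (String × String × List (List String) × List (List String)) :=
  let wordPairs := createWordPairsLean sentence_1 sentence_2
  let n1 : Int := sentence_1.length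
  let n2 : Int := sentence_2.length
  wordPairs.foldl
    (fun connections pair =>
      let lr := wcPos sentence_1 sentence_2 n1 n2 pair.2.2 [] []
      connections ++ [(pair.1, pair.2.1, lr.1, lr.2)]) []

-- ===== PORT B =====
def wordConnection_alt (sentence_1 : List String) (sentence_2 : List String) :
    List (String × String × List (List String) × List (List String)) :=
  let n1 : Int := sentence_1.length
  let n2 : Int := sentence_2.length
  (PySem.List.enumerate sentence_1 0).foldl
    (fun out pw1 =>
      (PySem.List.enumerate sentence_2 0).foldl
        (fun out2 pw2 =>
          if pw1.2 = pw2.2 then out2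
          else
            let left :=
              if 1 ≤ pw1.1 ∧ 1 ≤ pw2.1 then
                [[PySem.List.pyGetD sentence_1 (pw1.1 - 1) "", PySem.List.pyGetD sentence_2 (pw2.1 - 1) ""]]
              else []
            let right :=
              if pw1.1 + 1 < n1 ∧ pw2.1 + 1 < n2 then
                [[PySem.List.pyGetD sentence_1 (pw1.1 + 1) "", PySem.List.pyGetD sentence_2 (pw2.1 + 1) ""]]
              else []
            out2 ++ [(pw1.2, pw2.2, left, right)]) out) []

-- ===== PRECONDITION & SPEC =====
def Spec_wordConnection (sentence_1 : List String) (sentence_2 : List String) (out : List (String × String × List (List String) × List (List String))) : Prop := out = wordConnection_alt sentence_1 sentence_2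
instance (sentence_1 : List String) (sentence_2 : List String) (out : List (String × String × List (List String) × List (List String))) : Decidable (Spec_wordConnection sentence_1 sentence_2 out) := by unfold Spec_wordConnection; infer_instance

-- ===== CLAIM (what is proved, stated in full; the proofs are below) =====
def Claim_equal_wordConnection : Prop := ∀ (sentence_1 : List String) (sentence_2 : List String), Dom_wordConnection sentence_1 sentence_2 → Spec_wordConnection sentence_1 sentence_2 (wordConnection sentence_1 sentence_2)

-- ===== LEMMAS AND PROOFS =====

-- closed description of the inner loop of createWordPairs (pwp contribution only)
def pwpInner (w1 : String) (rem : List String) (p0 p1 : Int) :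
    List (String × String × List (Int × Int)) :=
  match rem with
  | [] => []
  | w2 :: rest =>
      (if w1 ≠ w2 then [(w1, w2, [(p0, p1)])] else []) ++ pwpInner w1 rest p0 (p1 + 1)

def pwpOuter (rem : List String) (s2 : List String) (p0 : Int) :
    List (String × String × List (Int × Int)) :=
  match rem with
  | [] => []
  | w1 :: rest => pwpInner w1 s2 p0 0 ++ pwpOuter rest s2 (p0 + 1)

-- B's per-pair value
def bElem (s1 s2 : List String) (w1 w2 : String) (p0 p1 : Int) :
    String × String × List (List String) × List (List String) :=
  (w1, w2,
    (if 1 ≤ p0 ∧ 1 ≤ p1 then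
        [[PySem.List.pyGetD s1 (p0 - 1) "", PySem.List.pyGetD s2 (p1 - 1) ""]]
      else []),
    (if p0 + 1 < (s1.length : Int) ∧ p1 + 1 < (s2.length : Int) then
        [[PySem.List.pyGetD s1 (p0 + 1) "", PySem.List.pyGetD s2 (p1 + 1) ""]]
      else []))

-- closed description of B's loops
def bInner (s1 s2 : List String) (w1 : String) (p0 : Int) (rem : List String) (p1 : Int) :
    List (String × String × List (List String) × List (List String)) :=
  match rem with
  | [] => []
  | w2 :: rest => (if w1 = w2 then [] else [bElem s1 s2 w1 w2 p0 p1]) ++ bInner s1 s2 w1 p0 rest (p1 + 1)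

def bOuter (s1 s2 : List String) (rem : List String) (p0 : Int) :
    List (String × String × List (List String) × List (List String)) :=
  match rem with
  | [] => []
  | w1 :: rest => bInner s1 s2 w1 p0 s2 0 ++ bOuter s1 s2 rest (p0 + 1)

lemma cwpInner_snd (w1 : String) (rem : List String) :
    ∀ (p0 p1 : Int) pairs pwp,
      (cwpInner w1 rem p0 p1 pairs pwp).2 = pwp ++ pwpInner w1 rem p0 p1 := by
  induction rem with
  | nil => intro p0 p1 pairs pwp; simp [cwpInner, pwpInner]
  | cons w2 rest ih =>
      intro p0 p1 pairs pwp
      simp only [cwpInner, pwpInner]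
      by_cases h : w1 = w2
      · subst h; simp [ih]
      · simp [h, ih]

lemma cwpOuter_snd (s2 : List String) (rem : List String) :
    ∀ (p0 : Int) pairs pwp,
      (cwpOuter rem s2 p0 pairs pwp).2 = pwp ++ pwpOuter rem s2 p0 := by
  induction rem with
  | nil => intro p0 pairs pwp; simp [cwpOuter, pwpOuter]
  | cons w1 rest ih =>
      intro p0 pairs pwp
      simp only [cwpOuter, pwpOuter]
      rw [ih, cwpInner_snd, List.append_assoc]

lemma bInner_foldl (s1 s2 : List String) (w1 : String) (p0 : Int) (rem : List String) :
    ∀ (p1 : Int) out,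
      (PySem.List.enumerate rem p1).foldl
        (fun out2 pw2 =>
          if w1 = pw2.2 then out2
          else
            out2 ++ [(w1, pw2.2,
              (if 1 ≤ p0 ∧ 1 ≤ pw2.1 then
                  [[PySem.List.pyGetD s1 (p0 - 1) "", PySem.List.pyGetD s2 (pw2.1 - 1) ""]]
                else []),
              (if p0 + 1 < (s1.length : Int) ∧ pw2.1 + 1 < (s2.length : Int) then
                  [[PySem.List.pyGetD s1 (p0 + 1) "", PySem.List.pyGetD s2 (pw2.1 + 1) ""]]
                else []))]) out
      = out ++ bInner s1 s2 w1 p0 rem p1 := by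
  induction rem with
  | nil => intro p1 out; simp [PySem.List.enumerate_nil, bInner]
  | cons w2 rest ih =>
      intro p1 out
      rw [PySem.List.enumerate_cons]
      simp only [List.foldl_cons]
      by_cases h : w1 = w2
      · subst h
        simp only [bInner, bElem, ih]
        simp
      · simp only [bInner, bElem, ih, if_neg h]
        simp

lemma bOuter_foldl (s1 s2 : List String) (rem : List String) :
    ∀ (p0 : Int) out,
      (PySem.List.enumerate rem p0).foldl
        (fun out pw1 =>
          (PySem.List.enumerate s2 0).foldl
            (fun out2 pw2 =>
              if pw1.2 = pw2.2 then out2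
              else
                out2 ++ [(pw1.2, pw2.2,
                  (if 1 ≤ pw1.1 ∧ 1 ≤ pw2.1 then
                      [[PySem.List.pyGetD s1 (pw1.1 - 1) "", PySem.List.pyGetD s2 (pw2.1 - 1) ""]]
                    else []),
                  (if pw1.1 + 1 < (s1.length : Int) ∧ pw2.1 + 1 < (s2.length : Int) then
                      [[PySem.List.pyGetD s1 (pw1.1 + 1) "", PySem.List.pyGetD s2 (pw2.1 + 1) ""]]
                    else []))]) out) out
      = out ++ bOuter s1 s2 rem p0 := by
  induction rem with
  | nil => intro p0 out; simp [PySem.List.enumerate_nil, bOuter]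
  | cons w1 rest ih =>
      intro p0 out
      rw [PySem.List.enumerate_cons]
      simp only [List.foldl_cons]
      rw [ih, bInner_foldl, bOuter]
      simp

lemma alt_eq_bOuter (s1 s2 : List String) :
    wordConnection_alt s1 s2 = bOuter s1 s2 s1 0 := by
  unfold wordConnection_alt
  rw [bOuter_foldl s1 s2 s1 0 []]
  simp

-- A's per-pair step equals B's per-pair value when positions are nonnegative
lemma wcPos_singleton (s1 s2 : List String) (p0 p1 : Int) (h0 : 0 ≤ p0) (h1 : 0 ≤ p1) :
    wcPos s1 s2 (s1.length : Int) (s2.length : Int) [(p0, p1)] [] []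
      = ((bElem s1 s2 "" "" p0 p1).2.2.1, (bElem s1 s2 "" "" p0 p1).2.2.2) := by
  simp only [wcPos, bElem]
  have hr1 : PySem.List.pyRange 0 1 1 = [0] := by decide
  simp only [Prod.mk.injEq]
  constructor
  · -- left component
    by_cases hL : p0 - 1 ≥ 0 ∧ p1 - 1 ≥ 0
    · rw [if_pos hL, if_pos (by omega : 1 ≤ p0 ∧ 1 ≤ p1), hr1]
      simp
    · rw [if_neg hL, if_neg (by omega : ¬(1 ≤ p0 ∧ 1 ≤ p1)),
        if_pos (by omega : p0 - 1 < 0 ∨ p1 - 1 < 0)]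
      by_cases hle : p0 ≤ p1
      · rw [if_pos hle, PySem.List.pyRange_one_eq_nil (by omega)]; rfl
      · rw [if_neg hle, PySem.List.pyRange_one_eq_nil (by omega)]; rfl
  · -- right component
    by_cases hR : p0 + 1 < (s1.length : Int) ∧ p1 + 1 < (s2.length : Int)
    · rw [if_pos hR, if_pos hR, hr1]
      simp
    · rw [if_neg hR, if_neg hR,
        if_pos (by omega : p0 + 1 ≥ (s1.length : Int) ∨ p1 + 1 ≥ (s2.length : Int))]
      by_cases hge : (s1.length : Int) - p0 ≥ (s2.length : Int) - p1
      · rw [if_pos hge, PySem.List.pyRange_one_eq_nil (by omega)]; rfl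
      · rw [if_neg hge, PySem.List.pyRange_one_eq_nil (by omega)]; rfl

lemma map_pwpInner (s1 s2 : List String) (w1 : String) (rem : List String) :
    ∀ (p0 p1 : Int), 0 ≤ p0 → 0 ≤ p1 →
      (pwpInner w1 rem p0 p1).map
        (fun pair =>
          let lr := wcPos s1 s2 (s1.length : Int) (s2.length : Int) pair.2.2 [] []
          (pair.1, pair.2.1, lr.1, lr.2))
      = bInner s1 s2 w1 p0 rem p1 := by
  induction rem with
  | nil => intro p0 p1 _ _; simp [pwpInner, bInner]
  | cons w2 rest ih =>
      intro p0 p1 h0 h1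
      simp only [pwpInner, bInner, List.map_append]
      rw [ih p0 (p1 + 1) h0 (by omega)]
      congr 1
      by_cases h : w1 = w2
      · simp [h]
      · simp [h, wcPos_singleton s1 s2 p0 p1 h0 h1, bElem]

lemma map_pwpOuter (s1 s2 : List String) (rem : List String) :
    ∀ (p0 : Int), 0 ≤ p0 →
      (pwpOuter rem s2 p0).map
        (fun pair =>
          let lr := wcPos s1 s2 (s1.length : Int) (s2.length : Int) pair.2.2 [] []
          (pair.1, pair.2.1, lr.1, lr.2))
      = bOuter s1 s2 rem p0 := by
  induction rem with
  | nil => intro p0 _; simp [pwpOuter, bOuter]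
  | cons w1 rest ih =>
      intro p0 h0
      simp only [pwpOuter, bOuter, List.map_append]
      rw [ih (p0 + 1) (by omega), map_pwpInner s1 s2 w1 s2 p0 0 h0 le_rfl]

-- ===== VERDICT (by name: the statement is the Claim_ definition above) =====
theorem wordConnection_spec : Claim_equal_wordConnection := by
  intro s1 s2 _
  unfold Spec_wordConnection
  unfold wordConnection
  rw [alt_eq_bOuter]
  simp only [createWordPairsLean, cwpOuter_snd, List.nil_append]
  rw [PySem.List.foldl_append_singleton_eq_map]
  simp only [List.nil_append]
  exact map_pwpOuter s1 s2 s1 0 le_rfl
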